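-- pv_equiv track=rewrite | github.com/junsungkim-lab/debait | app/orchestrator/runner.py | _infer_dependencies
-- ===== SOURCE A (Python) =====
-- from typing import Any, Dict, List
--
-- def _contains_any(text: str, keywords: list[str]) -> bool:
--     t = text.lower()
--     return any(k in t for k in keywords)
--
-- def _infer_dependencies(stages: List[Dict[str, str]]) -> Dict[int, List[int]]:
--     deps: Dict[int, List[int]] = {}
--     for idx, stage in enumerate(stages):
--         if idx == 0:
--             deps[idx] = []
--             continue
--
--         prompt = (stage.get("system_prompt") or "").lower()
--         all_prev = _contains_any(
--             prompt,
--             ["all previous", "all prior", "모든 이전", "앞선", "이전 단계 전체", "all outputs"],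
--         )
--         independent = _contains_any(prompt, ["independent", "standalone", "질문만", "독립적으로"])
--
--         current_deps: list[int] = []
--         if all_prev:
--             current_deps = list(range(idx))
--         else:
--             for prev_idx in range(idx):
--                 prev_name = (stages[prev_idx].get("name") or "").strip().lower()
--                 if len(prev_name) >= 3 and prev_name in prompt:
--                     current_deps.append(prev_idx)
--             if not current_deps and not independent:
--                 current_deps = [idx - 1]
--         deps[idx] = sorted(set(current_deps))
--     return deps
-- ===== SOURCE B (Python) =====
-- from typing import Dict, List
--
-- _ALL_PREV_KWS = ["all previous", "all prior", "모든 이전", "앞선", "이전 단계 전체", "all outputs"]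
-- _INDEP_KWS = ["independent", "standalone", "질문만", "독립적으로"]
--
--
-- def _infer_dependencies(stages: List[Dict[str, str]]) -> Dict[int, List[int]]:
--     # Multi-pattern substring matching: instead of testing every earlier stage
--     # name against the prompt one by one (O(n) substring scans per stage), keep a
--     # hash map  normalized-name -> {indices of earlier stages bearing it}  and,
--     # per prompt, look up every window prompt[i:i+L] (one L per distinct name
--     # length) in that map.  A window hits a key exactly when that name occurs in
--     # the prompt, so the hit set equals A's pairwise-scan result.
--     deps: Dict[int, List[int]] = {}
--     by_name: Dict[str, set] = {}
--     for idx, stage in enumerate(stages):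
--         if idx == 0:
--             deps[idx] = []
--         else:
--             prompt = (stage.get("system_prompt") or "").lower()
--             if any(k in prompt for k in _ALL_PREV_KWS):
--                 deps[idx] = list(range(idx))
--             else:
--                 lengths = {len(nm) for nm in by_name}
--                 hits: set = set()
--                 for i in range(len(prompt)):
--                     for L in lengths:
--                         s = by_name.get(prompt[i:i + L])
--                         if s is not None:
--                             hits |= s
--                 cur = sorted(hits)
--                 if not cur and not any(k in prompt for k in _INDEP_KWS):
--                     cur = [idx - 1]
--                 deps[idx] = cur
--         nm = (stage.get("name") or "").strip().lower()
--         if len(nm) >= 3: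
--             by_name.setdefault(nm, set()).add(idx)
--     return deps
-- ===== Notes on version B (the rewrite author's own statement) =====
-- stated objective: alternative
-- what changed: A tests every earlier stage name against the prompt with a separate substring search per pair; B instead grows a hash map from normalized name to the set of stage indices bearing it and scans each prompt once, looking up every window prompt[i:i+L] (one L per distinct name length) in that map, so per-stage work no longer includes one substring scan per earlier stage.
import Mathlib
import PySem

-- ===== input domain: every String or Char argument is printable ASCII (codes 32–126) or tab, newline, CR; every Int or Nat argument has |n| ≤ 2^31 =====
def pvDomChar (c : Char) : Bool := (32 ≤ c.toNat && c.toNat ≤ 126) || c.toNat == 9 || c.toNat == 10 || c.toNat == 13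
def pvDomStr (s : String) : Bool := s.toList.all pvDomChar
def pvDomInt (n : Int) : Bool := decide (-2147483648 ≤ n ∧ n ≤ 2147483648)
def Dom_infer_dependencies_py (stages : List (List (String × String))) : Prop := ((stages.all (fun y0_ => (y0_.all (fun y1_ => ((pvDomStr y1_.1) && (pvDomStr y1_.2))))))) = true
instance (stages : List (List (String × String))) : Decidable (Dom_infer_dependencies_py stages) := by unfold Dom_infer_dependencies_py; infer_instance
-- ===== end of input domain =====

set_option maxHeartbeats 1000000

-- B replaces A's pairwise scan (every earlier stage name tested against the prompt with a
-- separate substring search) by hash-based multi-pattern matching: a dict mapping each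
-- normalized name to the set of stage indices bearing it is grown once, and each prompt is
-- scanned by looking up every window prompt[i:i+L] (one L per distinct name length) in that
-- dict; a window hits a key exactly when that name occurs in the prompt (objective: alternative).

-- keyword constants (module-level literals in both Pythons)
def pvKwAllPrev : List String := ["all previous", "all prior", "모든 이전", "앞선", "이전 단계 전체", "all outputs"]
def pvKwIndep : List String := ["independent", "standalone", "질문만", "독립적으로"]

-- stage.get(key) or ""  (dict lookup; None and "" both give "")
def pvDictGetD (d : List (String × String)) (k : String) : String :=
  ((PySem.Dict.mk d).get? k).getD ""

-- ===== PORT A =====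
-- helper _contains_any(text, keywords)
def pvContainsAny (text : String) (keywords : List String) : Bool :=
  let t := PySem.Str.lower text
  keywords.any (fun k => PySem.Str.isIn k t)

-- one iteration of A's  'for idx, stage in enumerate(stages)'  body
def pvStepA (stages : List (List (String × String))) (deps : PySem.Dict Int (List Int))
    (p : Int × List (String × String)) : PySem.Dict Int (List Int) :=
  let idx := p.1
  let stage := p.2
  if idx == 0 then deps.insert idx []
  else
    let prompt := PySem.Str.lower (pvDictGetD stage "system_prompt")
    let all_prev := pvContainsAny prompt pvKwAllPrev
    let independent := pvContainsAny prompt pvKwIndep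
    let current_deps : List Int :=
      if all_prev then PySem.List.pyRange 0 idx
      else
        let cd := (PySem.List.pyRange 0 idx).foldl
          (fun acc prev_idx =>
            let prev_name := PySem.Str.lower (PySem.Str.strip
              (pvDictGetD (PySem.List.pyGetD stages prev_idx []) "name"))
            if (decide (3 ≤ PySem.Str.len prev_name) && PySem.Str.isIn prev_name prompt) = true
            then acc ++ [prev_idx] else acc) []
        if cd.isEmpty && !independent then [idx - 1] else cd
    deps.insert idx (PySem.List.sorted (PySem.Set.ofList current_deps) (fun x => x))

def infer_dependencies_py (stages : List (List (String × String))) : List (Int × List Int) :=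
  ((PySem.List.enumerate stages).foldl (pvStepA stages) (PySem.Dict.mk [])).items

-- ===== PORT B =====
-- normalised stage name: (stage.get("name") or "").strip().lower()
def pvNorm (stage : List (String × String)) : String :=
  PySem.Str.lower (PySem.Str.strip (pvDictGetD stage "name"))

-- inner loop 'for L in lengths: s = by_name.get(prompt[i:i+L]); if s is not None: hits |= s'
def pvScanPos (byName : PySem.Dict String (PySem.Set Int)) (prompt : String)
    (lengths : PySem.Set Int) (hits : PySem.Set Int) (i : Int) : PySem.Set Int :=
  lengths.foldl (fun h L =>
    match byName.get? (PySem.Str.slice prompt (some i) (some (i + L))) with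
    | some s => PySem.Set.update h s
    | none => h) hits

-- B's single walk: deps under construction, byName = {normalized name: set of earlier indices}
-- (Python's 'by_name.setdefault(nm, set()).add(idx)' — in-place add — is setdefault then
-- re-insert of the grown set here)
def pvAltLoop (deps : PySem.Dict Int (List Int)) (byName : PySem.Dict String (PySem.Set Int))
    (idx : Int) : List (List (String × String)) → PySem.Dict Int (List Int)
  | [] => deps
  | stage :: rest =>
    let deps' :=
      if idx == 0 then deps.insert idx []
      else
        let prompt := PySem.Str.lower (pvDictGetD stage "system_prompt")
        if pvKwAllPrev.any (fun k => PySem.Str.isIn k prompt) then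
          deps.insert idx (PySem.List.pyRange 0 idx)
        else
          let lengths : PySem.Set Int := PySem.Set.ofList (byName.keys.map PySem.Str.len)
          let hits : PySem.Set Int :=
            (PySem.List.pyRange 0 (PySem.Str.len prompt)).foldl (pvScanPos byName prompt lengths) []
          let cur := PySem.List.sorted hits (fun x => x)
          let cur := if cur.isEmpty && !(pvKwIndep.any (fun k => PySem.Str.isIn k prompt))
                     then [idx - 1] else cur
          deps.insert idx cur
    let nm := pvNorm stage
    let byName' := if 3 ≤ PySem.Str.len nm
      then (byName.setdefault nm []).insert nm
             (PySem.Set.add ((byName.get? nm).getD []) idx)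
      else byName
    pvAltLoop deps' byName' (idx + 1) rest

def infer_dependencies_py_alt (stages : List (List (String × String))) : List (Int × List Int) :=
  (pvAltLoop (PySem.Dict.mk []) (PySem.Dict.mk []) 0 stages).items

-- ===== PRECONDITION & SPEC =====
def Spec_infer_dependencies_py (stages : List (List (String × String))) (out : List (Int × List Int)) : Prop := out = infer_dependencies_py_alt stages
instance (stages : List (List (String × String))) (out : List (Int × List Int)) : Decidable (Spec_infer_dependencies_py stages out) := by unfold Spec_infer_dependencies_py; infer_instance

-- ===== CLAIM (what is proved, stated in full; the proofs are below) =====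
def Claim_equal_infer_dependencies_py : Prop := ∀ (stages : List (List (String × String))), Dom_infer_dependencies_py stages → Spec_infer_dependencies_py stages (infer_dependencies_py stages)

-- ===== LEMMAS AND PROOFS =====

-- the pairwise-scan condition of A: len(nm) >= 3 and nm in prompt
def pvKeep (prompt nm : String) : Bool :=
  decide (3 ≤ PySem.Str.len nm) && PySem.Str.isIn nm prompt

-- (index, normalised name) of the stages already walked
def pvSeenOf (pre : List (List (String × String))) : List (Int × String) :=
  (PySem.List.enumerate pre).map (fun q => (q.1, pvNorm q.2))

-- indices of stages in pre whose normalised name is nm (and has length ≥ 3)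
def pvMatches (pre : List (List (String × String))) (nm : String) : List Int :=
  ((PySem.List.enumerate pre).filter
      (fun q => decide (3 ≤ PySem.Str.len (pvNorm q.2)) && (pvNorm q.2 == nm))).map (fun q => q.1)

-- the dictionary invariant of B's walk
def pvInv (pre : List (List (String × String))) (d : PySem.Dict String (PySem.Set Int)) : Prop :=
  ∀ nm, d.get? nm = if pvMatches pre nm = [] then none else some (pvMatches pre nm)

-- lowercasing is idempotent, character by character
lemma pv_lowerChar_idem (c : Char) :
    PySem.Chars.lowerChar (PySem.Chars.lowerChar c) = PySem.Chars.lowerChar c := by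
  unfold PySem.Chars.lowerChar PySem.Chars.isupper
  by_cases h : ('A' ≤ c ∧ c ≤ 'Z')
  · have hn : 65 ≤ c.toNat ∧ c.toNat ≤ 90 := by
      rcases h with ⟨h1, h2⟩
      rw [Char.le_def] at h1 h2
      exact ⟨h1, h2⟩
    have hv : Nat.isValidChar (c.toNat + 32) := Or.inl (by omega)
    have ht : (Char.ofNat (c.toNat + 32)).toNat = c.toNat + 32 := by
      rw [Char.toNat_ofNat]; simp [hv]
    have hup : ¬ (Char.ofNat (c.toNat + 32) ≤ 'Z') := by
      intro h1
      rw [Char.le_def] at h1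
      have h1' : (Char.ofNat (c.toNat + 32)).toNat ≤ 90 := h1
      omega
    simp only [Bool.and_eq_true, decide_eq_true_eq]
    simp [h, hup]
  · simp only [Bool.and_eq_true, decide_eq_true_eq]
    have : ¬ ('A' ≤ c) ∨ ¬ (c ≤ 'Z') := Decidable.not_and_iff_not_or_not.mp h
    rcases this with h1 | h1 <;> simp [h1]

lemma pv_lower_idem (s : String) :
    (PySem.Str.lower (PySem.Str.lower s)).toList = (PySem.Str.lower s).toList := by
  simp [PySem.Str.toList_lower, PySem.Chars.lower, List.map_map, Function.comp_def,
    pv_lowerChar_idem]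

-- A's _contains_any applied to an already-lowered text = B's plain scan
lemma pv_containsAny_lower (raw : String) (ks : List String) :
    pvContainsAny (PySem.Str.lower raw) ks
      = ks.any (fun k => PySem.Str.isIn k (PySem.Str.lower raw)) := by
  unfold pvContainsAny
  simp only [PySem.Str.isIn_eq, pv_lower_idem]

-- sorted(set(l)) = l for a strictly increasing l
lemma pv_sortedSet_id (l : List Int) (h : l.Pairwise (· < ·)) :
    PySem.List.sorted (PySem.Set.ofList l) (fun x => x) = l := by
  rw [PySem.Set.ofList_eq_self_of_nodup _ h.nodup]
  exact PySem.List.sorted_eq_of_perm_of_pairwise_lt _ _ _ (List.Perm.refl l) h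

lemma pv_seenOf_append (pre : List (List (String × String))) (st : List (String × String)) :
    pvSeenOf (pre ++ [st]) = pvSeenOf pre ++ [((pre.length : Int), pvNorm st)] := by
  unfold pvSeenOf
  rw [PySem.List.enumerate_append]
  simp [PySem.List.enumerate_cons, PySem.List.enumerate_nil]

-- A's inner scan over range(idx) with repeated stages[prev_idx] lookups
-- = a filter of the walked (index, name) pairs
lemma pv_cd_eq (pre rest : List (List (String × String))) (prompt : String) :
    (PySem.List.pyRange 0 (pre.length : Int)).filter
        (fun i => pvKeep prompt (pvNorm (PySem.List.pyGetD (pre ++ rest) i [])))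
      = ((pvSeenOf pre).filter (fun q => pvKeep prompt q.2)).map (fun q => q.1) := by
  induction pre using List.reverseRecOn generalizing rest with
  | nil =>
    rw [show ((([] : List (List (String × String))).length : Int)) = 0 from rfl,
      PySem.List.pyRange_one_eq_nil (le_refl 0)]
    simp [pvSeenOf, PySem.List.enumerate_nil]
  | append_singleton pre st ih =>
    have hlen : ((pre ++ [st]).length : Int) = (pre.length : Int) + 1 := by simp
    rw [hlen, PySem.List.pyRange_one_succ_right (by positivity), List.filter_append,
      pv_seenOf_append, List.filter_append, List.map_append]
    refine congr_arg₂ (· ++ ·) ?_ ?_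
    · have := ih ([st] ++ rest)
      rw [List.append_assoc]
      rw [show pre ++ ([st] ++ rest) = pre ++ [st] ++ rest from (List.append_assoc _ _ _).symm] at this ⊢
      refine Eq.trans (List.filter_congr ?_) this
      intro i hi
      rfl
    · have hget : PySem.List.pyGetD (pre ++ [st] ++ rest) (pre.length : Int) [] = st := by
        rw [PySem.List.pyGetD_natCast]
        rw [List.append_assoc]
        simp
      simp only [List.filter_singleton, hget]
      by_cases h : pvKeep prompt (pvNorm st) = true <;> simp [h]

-- every element of an enumeration from s is ≥ s and < s + length
lemma pv_mem_enumerate_bound {α : Type} (xs : List α) (s : Int) (q : Int × α)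
    (h : q ∈ PySem.List.enumerate xs s) : s ≤ q.1 ∧ q.1 < s + xs.length := by
  induction xs generalizing s with
  | nil => simp [PySem.List.enumerate_nil] at h
  | cons x t ih =>
    rw [PySem.List.enumerate_cons] at h
    rcases List.mem_cons.mp h with h | h
    · subst h
      refine ⟨le_refl _, ?_⟩
      simp only [List.length_cons]
      push_cast
      omega
    · have := ih (s + 1) h
      simp at this ⊢
      omega

lemma pv_matches_bound (pre : List (List (String × String))) (nm : String) (j : Int)
    (h : j ∈ pvMatches pre nm) : 0 ≤ j ∧ j < pre.length := by
  unfold pvMatches at h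
  rcases List.mem_map.mp h with ⟨q, hq, rfl⟩
  have := pv_mem_enumerate_bound _ _ _ (List.mem_filter.mp hq).1
  omega


-- matches of pre ++ [st]
lemma pv_matches_append (pre : List (List (String × String))) (st : List (String × String))
    (nm : String) :
    pvMatches (pre ++ [st]) nm
      = pvMatches pre nm
        ++ (if (decide (3 ≤ PySem.Str.len (pvNorm st)) && (pvNorm st == nm)) = true
            then [(pre.length : Int)] else []) := by
  unfold pvMatches
  rw [PySem.List.enumerate_append]
  rw [List.filter_append, List.map_append]
  refine congr_arg₂ (· ++ ·) rfl ?_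
  rw [PySem.List.enumerate_cons, PySem.List.enumerate_nil]
  rw [List.filter_singleton]
  have hp : (decide (3 ≤ PySem.Str.len (pvNorm ((0 : Int) + (pre.length : Int), st).2))
      && (pvNorm ((0 : Int) + (pre.length : Int), st).2 == nm))
      = (decide (3 ≤ PySem.Str.len (pvNorm st)) && (pvNorm st == nm)) := rfl
  rw [hp, zero_add]
  by_cases h : (decide (3 ≤ PySem.Str.len (pvNorm st)) && (pvNorm st == nm)) = true
  · rw [if_pos h, h]
    rfl
  · have h2 : ¬ ((decide (3 ≤ PySem.Str.len (pvNorm st)) && (pvNorm st == nm)) = true) := h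
    rw [Bool.not_eq_true] at h
    rw [if_neg h2, h]
    rfl

-- membership / nodup through a set-accumulating fold
lemma pv_mem_foldl_acc {β : Type} (f : PySem.Set Int → β → PySem.Set Int) (Q : β → Prop) (j : Int)
    (hf : ∀ h x, j ∈ f h x ↔ j ∈ h ∨ Q x) :
    ∀ (l : List β) (h0 : PySem.Set Int), j ∈ l.foldl f h0 ↔ j ∈ h0 ∨ ∃ x ∈ l, Q x := by
  intro l
  induction l with
  | nil => simp
  | cons x t ih =>
    intro h0
    rw [List.foldl_cons, ih, hf]
    simp only [List.mem_cons]
    aesop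

lemma pv_nodup_foldl_acc {β : Type} (f : PySem.Set Int → β → PySem.Set Int)
    (hf : ∀ h x, h.Nodup → (f h x).Nodup) :
    ∀ (l : List β) (h0 : PySem.Set Int), h0.Nodup → (l.foldl f h0).Nodup := by
  intro l
  induction l with
  | nil => intro h0 h; exact h
  | cons x t ih => intro h0 h; exact ih _ (hf _ _ h)

-- membership in B's inner loop over the distinct name lengths
lemma pv_mem_scanPos (byName : PySem.Dict String (PySem.Set Int)) (prompt : String)
    (Ls : PySem.Set Int) (h0 : PySem.Set Int) (i j : Int) :
    (j ∈ pvScanPos byName prompt Ls h0 i)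
      ↔ j ∈ h0 ∨ ∃ L ∈ Ls, ∃ s,
          byName.get? (PySem.Str.slice prompt (some i) (some (i + L))) = some s ∧ j ∈ s := by
  unfold pvScanPos
  apply pv_mem_foldl_acc
  intro h L
  cases hg : byName.get? (PySem.Str.slice prompt (some i) (some (i + L))) with
  | none => simp
  | some s => simp [PySem.Set.mem_update]

lemma pv_nodup_scanPos (byName : PySem.Dict String (PySem.Set Int)) (prompt : String)
    (Ls : PySem.Set Int) (h0 : PySem.Set Int) (i : Int) (h : h0.Nodup) :
    (pvScanPos byName prompt Ls h0 i).Nodup := by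
  unfold pvScanPos
  refine pv_nodup_foldl_acc _ ?_ _ _ h
  intro h x hnd
  cases hg : byName.get? (PySem.Str.slice prompt (some i) (some (i + x))) with
  | none => exact hnd
  | some s => exact PySem.Set.nodup_update _ _ hnd

-- membership in B's outer loop over prompt positions
lemma pv_mem_scan (byName : PySem.Dict String (PySem.Set Int)) (prompt : String)
    (lengths : PySem.Set Int) (is : List Int) (h0 : PySem.Set Int) (j : Int) :
    (j ∈ is.foldl (pvScanPos byName prompt lengths) h0)
      ↔ j ∈ h0 ∨ ∃ i ∈ is, ∃ L ∈ lengths, ∃ s,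
          byName.get? (PySem.Str.slice prompt (some i) (some (i + L))) = some s ∧ j ∈ s := by
  apply pv_mem_foldl_acc
  intro h i
  exact pv_mem_scanPos byName prompt lengths h i j

lemma pv_nodup_scan (byName : PySem.Dict String (PySem.Set Int)) (prompt : String)
    (lengths : PySem.Set Int) (is : List Int) (h0 : PySem.Set Int) (h : h0.Nodup) :
    (is.foldl (pvScanPos byName prompt lengths) h0).Nodup := by
  refine pv_nodup_foldl_acc _ ?_ _ _ h
  intro h i hnd
  exact pv_nodup_scanPos byName prompt lengths h i hnd

-- a slice of the prompt is a substring of it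
lemma pv_slice_isIn (prompt : String) (i L : Int) (hi : 0 ≤ i) (hL : 0 ≤ L) :
    PySem.Str.isIn (PySem.Str.slice prompt (some i) (some (i + L))) prompt = true := by
  rw [PySem.Str.isIn_iff_infix, PySem.Str.toList_slice, PySem.Chars.slice_eq_listSlice,
    PySem.List.slice_toNat _ hi (by omega)]
  exact ((List.take_prefix _ _).isInfix).trans (List.drop_suffix _ _).isInfix

-- every key of the dictionary is a name of length ≥ 3
lemma pv_key_len (pre : List (List (String × String)))
    (byName : PySem.Dict String (PySem.Set Int)) (hInv : pvInv pre byName)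
    (nmk : String) (h : nmk ∈ byName.keys) : 3 ≤ PySem.Str.len nmk := by
  have hc := (PySem.Dict.contains_iff_mem_keys byName nmk).mpr h
  rw [PySem.Dict.contains_eq_isSome_get?] at hc
  have hinv := hInv nmk
  by_cases hemp : pvMatches pre nmk = []
  · rw [if_pos hemp] at hinv
    rw [hinv] at hc
    cases hc
  · rcases List.exists_mem_of_ne_nil _ hemp with ⟨j, hj⟩
    unfold pvMatches at hj
    rcases List.mem_map.mp hj with ⟨q, hq, rfl⟩
    have hcond := (List.mem_filter.mp hq).2
    simp only [Bool.and_eq_true, decide_eq_true_eq] at hcond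
    obtain ⟨hlen3, hname⟩ := hcond
    rw [← eq_of_beq hname]
    exact hlen3

-- the crux: under the invariant, B's window-lookup hit set has exactly the members of
-- A's pairwise-scan result

lemma pv_hits_iff (pre : List (List (String × String))) (prompt : String)
    (byName : PySem.Dict String (PySem.Set Int)) (hInv : pvInv pre byName) (j : Int) :
    (j ∈ (PySem.List.pyRange 0 (PySem.Str.len prompt)).foldl
        (pvScanPos byName prompt (PySem.Set.ofList (byName.keys.map PySem.Str.len))) [])
      ↔ j ∈ ((pvSeenOf pre).filter (fun q => pvKeep prompt q.2)).map (fun q => q.1) := by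
  rw [pv_mem_scan]
  simp only [List.mem_nil_iff, false_or]
  constructor
  · rintro ⟨i, hi, L, hL, s, hs, hj⟩
    have hinv := hInv (PySem.Str.slice prompt (some i) (some (i + L)))
    rw [hs] at hinv
    by_cases hemp : pvMatches pre (PySem.Str.slice prompt (some i) (some (i + L))) = []
    · rw [if_pos hemp] at hinv; cases hinv
    · rw [if_neg hemp] at hinv
      have hsj : j ∈ pvMatches pre (PySem.Str.slice prompt (some i) (some (i + L))) :=
        (Option.some.inj hinv) ▸ hj
      unfold pvMatches at hsj
      rcases List.mem_map.mp hsj with ⟨q, hq, rfl⟩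
      rcases List.mem_filter.mp hq with ⟨hqmem, hcond⟩
      simp only [Bool.and_eq_true, decide_eq_true_eq] at hcond
      obtain ⟨hlen3, hname⟩ := hcond
      have hname' : pvNorm q.2 = PySem.Str.slice prompt (some i) (some (i + L)) :=
        eq_of_beq hname
      have hi' : 0 ≤ i ∧ i < PySem.Str.len prompt := by
        rw [PySem.List.mem_pyRange_one] at hi; exact hi
      have hL0 : 0 ≤ L := by
        rw [PySem.Set.mem_ofList] at hL
        rcases List.mem_map.mp hL with ⟨nmk, hk, rfl⟩
        have := pv_key_len pre byName hInv nmk hk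
        omega
      refine List.mem_map.mpr ⟨(q.1, pvNorm q.2), ?_, rfl⟩
      refine List.mem_filter.mpr ⟨?_, ?_⟩
      · exact List.mem_map.mpr ⟨q, hqmem, rfl⟩
      · unfold pvKeep
        simp only [Bool.and_eq_true, decide_eq_true_eq]
        refine ⟨hlen3, ?_⟩
        rw [hname']
        exact pv_slice_isIn prompt i L hi'.1 hL0
  · intro hj
    rcases List.mem_map.mp hj with ⟨q, hq, rfl⟩
    rcases List.mem_filter.mp hq with ⟨hqmem, hkeep⟩
    rcases List.mem_map.mp hqmem with ⟨r, hrmem, rfl⟩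
    unfold pvKeep at hkeep
    simp only [Bool.and_eq_true, decide_eq_true_eq] at hkeep
    obtain ⟨hlen3, hisin⟩ := hkeep
    set nm := pvNorm r.2 with hnm
    -- r.1 ∈ pvMatches pre nm
    have hmem : r.1 ∈ pvMatches pre nm := by
      unfold pvMatches
      refine List.mem_map.mpr ⟨r, List.mem_filter.mpr ⟨hrmem, ?_⟩, rfl⟩
      simp only [Bool.and_eq_true, decide_eq_true_eq]
      exact ⟨hlen3, beq_self_eq_true nm⟩
    have hne : pvMatches pre nm ≠ [] := List.ne_nil_of_mem hmem
    have hget : byName.get? nm = some (pvMatches pre nm) := by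
      have := hInv nm; rw [if_neg hne] at this; exact this
    -- nm occurs in prompt at some position jp
    have hinf : nm.toList <:+: prompt.toList := (PySem.Str.isIn_iff_infix _ _).mp hisin
    have : ∃ jp, nm.toList <+: prompt.toList.drop jp :=
      (PySem.Chars.exists_prefix_drop_iff_isIn nm.toList prompt.toList).mpr
        (by rw [← PySem.Str.isIn_eq]; exact hisin)
    rcases this with ⟨jp, hjp⟩
    have hnm0 : nm.toList ≠ [] := by
      intro h
      rw [PySem.Str.len_eq, h] at hlen3
      simp at hlen3
    have hjplt : jp < prompt.toList.length := by
      by_contra hge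
      have hge' : prompt.toList.length ≤ jp := by omega
      rw [List.drop_eq_nil_of_le hge'] at hjp
      exact hnm0 (List.prefix_nil.mp hjp)
    -- the window at jp of width len(nm) is exactly nm
    have hslice : PySem.Str.slice prompt (some (jp : Int))
        (some ((jp : Int) + (nm.toList.length : Int))) = nm := by
      apply String.toList_inj.mp
      rw [PySem.Str.toList_slice, PySem.Chars.slice_eq_listSlice,
        PySem.List.slice_natCast_add]
      exact (List.prefix_iff_eq_take.mp hjp).symm
    refine ⟨(jp : Int), ?_, (nm.toList.length : Int), ?_, pvMatches pre nm, ?_, hmem⟩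
    · rw [PySem.List.mem_pyRange_one, PySem.Str.len_eq]
      refine ⟨by exact_mod_cast jp.zero_le, by exact_mod_cast hjplt⟩
    · rw [PySem.Set.mem_ofList]
      refine List.mem_map.mpr ⟨nm, ?_, PySem.Str.len_eq nm⟩
      rw [← PySem.Dict.contains_iff_mem_keys, PySem.Dict.contains_eq_isSome_get?, hget]
      rfl
    · rw [hslice]; exact hget


-- A's pairwise-scan list is strictly increasing
lemma pv_cd_pairwise (pre : List (List (String × String))) (prompt : String) :
    (((pvSeenOf pre).filter (fun q => pvKeep prompt q.2)).map (fun q => q.1)).Pairwise (· < ·) := by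
  rw [← pv_cd_eq pre [] prompt]
  exact List.Pairwise.filter _ (PySem.List.pairwise_lt_pyRange_one 0 _)

-- sorting B's hit set gives A's (already increasing) scan list
lemma pv_sorted_hits (pre : List (List (String × String))) (prompt : String)
    (byName : PySem.Dict String (PySem.Set Int)) (hInv : pvInv pre byName) :
    PySem.List.sorted
        ((PySem.List.pyRange 0 (PySem.Str.len prompt)).foldl
          (pvScanPos byName prompt (PySem.Set.ofList (byName.keys.map PySem.Str.len))) [])
        (fun x => x)
      = ((pvSeenOf pre).filter (fun q => pvKeep prompt q.2)).map (fun q => q.1) := by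
  apply PySem.List.sorted_eq_of_perm_of_pairwise_lt
  · refine (List.perm_ext_iff_of_nodup ?_ ?_).mpr ?_
    · exact (pv_cd_pairwise pre prompt).nodup
    · exact pv_nodup_scan _ _ _ _ _ List.nodup_nil
    · intro a; exact (pv_hits_iff pre prompt byName hInv a).symm
  · exact pv_cd_pairwise pre prompt

-- the per-stage step of A equals the per-stage deps update of B
lemma pv_step_eq (pre rest : List (List (String × String))) (st : List (String × String))
    (d : PySem.Dict Int (List Int)) (byName : PySem.Dict String (PySem.Set Int))
    (hInv : pvInv pre byName) :
    pvStepA (pre ++ st :: rest) d ((pre.length : Int), st)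
      = (if ((pre.length : Int)) == 0 then d.insert (pre.length : Int) []
         else
           let prompt := PySem.Str.lower (pvDictGetD st "system_prompt")
           if pvKwAllPrev.any (fun k => PySem.Str.isIn k prompt) then
             d.insert (pre.length : Int) (PySem.List.pyRange 0 (pre.length : Int))
           else
             let lengths : PySem.Set Int := PySem.Set.ofList (byName.keys.map PySem.Str.len)
             let hits : PySem.Set Int :=
               (PySem.List.pyRange 0 (PySem.Str.len prompt)).foldl
                 (pvScanPos byName prompt lengths) []
             let cur := PySem.List.sorted hits (fun x => x)
             let cur := if cur.isEmpty && !(pvKwIndep.any (fun k => PySem.Str.isIn k prompt))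
                        then [(pre.length : Int) - 1] else cur
             d.insert (pre.length : Int) cur) := by
  unfold pvStepA
  by_cases h0 : ((pre.length : Int)) == 0
  · simp [h0]
  · simp only [h0, if_false, Bool.false_eq_true]
    rw [pv_containsAny_lower, pv_containsAny_lower]
    set prompt := PySem.Str.lower (pvDictGetD st "system_prompt") with hprompt
    by_cases hap : pvKwAllPrev.any (fun k => PySem.Str.isIn k prompt) = true
    · simp only [hap, if_true]
      rw [pv_sortedSet_id _ (PySem.List.pairwise_lt_pyRange_one 0 _)]
    · simp only [hap, if_false, Bool.false_eq_true]
      have hcd : (PySem.List.pyRange 0 (pre.length : Int)).foldl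
          (fun acc prev_idx =>
            let prev_name := PySem.Str.lower (PySem.Str.strip
              (pvDictGetD (PySem.List.pyGetD (pre ++ st :: rest) prev_idx []) "name"))
            if (decide (3 ≤ PySem.Str.len prev_name) && PySem.Str.isIn prev_name prompt) = true
            then acc ++ [prev_idx] else acc) []
          = ((pvSeenOf pre).filter (fun q => pvKeep prompt q.2)).map (fun q => q.1) := by
        have hfold := PySem.List.foldl_append_if
          (fun i => pvKeep prompt (pvNorm (PySem.List.pyGetD (pre ++ st :: rest) i [])))
          (fun (x : Int) => x) (PySem.List.pyRange 0 (pre.length : Int)) []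
        simp only [List.nil_append, List.map_id'] at hfold
        rw [show (fun (acc : List Int) (prev_idx : Int) =>
            let prev_name := PySem.Str.lower (PySem.Str.strip
              (pvDictGetD (PySem.List.pyGetD (pre ++ st :: rest) prev_idx []) "name"))
            if (decide (3 ≤ PySem.Str.len prev_name) && PySem.Str.isIn prev_name prompt) = true
            then acc ++ [prev_idx] else acc)
          = (fun (acc : List Int) (i : Int) =>
            if pvKeep prompt (pvNorm (PySem.List.pyGetD (pre ++ st :: rest) i [])) = true
            then acc ++ [(fun (x : Int) => x) i] else acc) from rfl]
        rw [hfold]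
        exact pv_cd_eq pre (st :: rest) prompt
      rw [hcd]
      rw [pv_sorted_hits pre prompt byName hInv]
      by_cases hemp : (((pvSeenOf pre).filter (fun q => pvKeep prompt q.2)).map (fun q => q.1)).isEmpty
          && !(pvKwIndep.any (fun k => PySem.Str.isIn k prompt))
      · simp only [hemp, if_true]
        rw [pv_sortedSet_id _ (by simp)]
      · simp only [hemp, if_false, Bool.false_eq_true]
        rw [pv_sortedSet_id _ (pv_cd_pairwise pre prompt)]

-- the invariant holds initially and is preserved by B's bookkeeping step
lemma pv_inv_nil : pvInv [] (PySem.Dict.mk []) := by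
  intro nm
  have h : pvMatches [] nm = [] := rfl
  rw [h, if_pos rfl]
  rfl

lemma pv_inv_step (pre : List (List (String × String))) (st : List (String × String))
    (byName : PySem.Dict String (PySem.Set Int)) (hInv : pvInv pre byName) :
    pvInv (pre ++ [st])
      (if 3 ≤ PySem.Str.len (pvNorm st)
       then (byName.setdefault (pvNorm st) []).insert (pvNorm st)
              (PySem.Set.add ((byName.get? (pvNorm st)).getD []) (pre.length : Int))
       else byName) := by
  intro nm
  by_cases hl : 3 ≤ PySem.Str.len (pvNorm st)
  · rw [if_pos hl]
    by_cases heq : nm = pvNorm st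
    · rw [heq]
      have hc : (decide (3 ≤ PySem.Str.len (pvNorm st)) && (pvNorm st == pvNorm st)) = true := by
        rw [decide_eq_true hl, beq_self_eq_true]; rfl
      have hmA : pvMatches (pre ++ [st]) (pvNorm st)
          = pvMatches pre (pvNorm st) ++ [(pre.length : Int)] := by
        rw [pv_matches_append, if_pos hc]
      have hgetD : (byName.get? (pvNorm st)).getD [] = pvMatches pre (pvNorm st) := by
        have hi := hInv (pvNorm st)
        by_cases hemp : pvMatches pre (pvNorm st) = []
        · rw [if_pos hemp] at hi; rw [hi, hemp]; rfl
        · rw [if_neg hemp] at hi; rw [hi]; rfl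
      have hfresh : (PySem.Set.add ((byName.get? (pvNorm st)).getD []) (pre.length : Int))
          = pvMatches pre (pvNorm st) ++ [(pre.length : Int)] := by
        rw [hgetD]
        unfold PySem.Set.add
        rw [if_neg]
        intro hcon
        have hm := (PySem.Set.contains_iff _ _).mp hcon
        have := (pv_matches_bound pre (pvNorm st) _ hm).2
        omega
      rw [hmA, if_neg (by simp), PySem.Dict.get?_insert_self, hfresh]
    · have heq' : pvNorm st ≠ nm := fun h => heq h.symm
      rw [PySem.Dict.get?_insert_of_ne _ _ heq, PySem.Dict.get?_setdefault_of_ne _ _ heq]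
      have hc : (decide (3 ≤ PySem.Str.len (pvNorm st)) && (pvNorm st == nm)) = false := by
        rw [beq_eq_false_iff_ne.mpr heq', Bool.and_false]
      have hmA : pvMatches (pre ++ [st]) nm = pvMatches pre nm := by
        rw [pv_matches_append, if_neg (by rw [hc]; exact Bool.false_ne_true), List.append_nil]
      rw [hmA]
      exact hInv nm
  · rw [if_neg hl]
    have hc : (decide (3 ≤ PySem.Str.len (pvNorm st)) && (pvNorm st == nm)) = false := by
      rw [decide_eq_false hl, Bool.false_and]
    have hmA : pvMatches (pre ++ [st]) nm = pvMatches pre nm := by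
      rw [pv_matches_append, if_neg (by rw [hc]; exact Bool.false_ne_true), List.append_nil]
    rw [hmA]
    exact hInv nm

-- the two loops agree, step by step
lemma pv_loop_eq (rest : List (List (String × String))) :
    ∀ (pre : List (List (String × String))) (d : PySem.Dict Int (List Int))
      (byName : PySem.Dict String (PySem.Set Int)), pvInv pre byName →
      (PySem.List.enumerate rest (pre.length : Int)).foldl (pvStepA (pre ++ rest)) d
        = pvAltLoop d byName (pre.length : Int) rest := by
  induction rest with
  | nil => intro pre d byName _; simp [PySem.List.enumerate_nil, pvAltLoop]
  | cons st rest ih =>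
    intro pre d byName hInv
    rw [PySem.List.enumerate_cons, List.foldl_cons]
    have h1 : pre ++ st :: rest = (pre ++ [st]) ++ rest := by simp
    have h2 : ((pre.length : Int)) + 1 = (((pre ++ [st]).length : Int)) := by simp
    rw [h2, h1]
    rw [ih (pre ++ [st]) _ _ (pv_inv_step pre st byName hInv)]
    conv_rhs => rw [pvAltLoop]
    rw [← h1, pv_step_eq pre rest st d byName hInv, ← h2]

-- ===== VERDICT (by name: the statement is the Claim_ definition above) =====
theorem infer_dependencies_py_spec : Claim_equal_infer_dependencies_py := by
  intro stages _
  unfold Spec_infer_dependencies_py infer_dependencies_py infer_dependencies_py_alt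
  have := pv_loop_eq stages [] (PySem.Dict.mk []) (PySem.Dict.mk []) pv_inv_nil
  simpa using congrArg PySem.Dict.items this
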